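-- pv_equiv track=rewrite | github.com/Jayden9912/lane_detection | utils/prob2lines/curve_fitting_Tusimple.py | lane_coords_preprocess
-- ===== SOURCE A (Python) =====
-- def lane_coords_preprocess(lane_coords):
--     filtered_coords = []
--     for l in lane_coords:
--         tmp_x = []
--         tmp_y = []
--         tmp_l = []
--         for (x, y) in l:
--             if x != -1:
--                 tmp_x.append(x)
--                 tmp_y.append(y)
--         tmp_l.append(tmp_x)
--         tmp_l.append(tmp_y)
--         filtered_coords.append(tmp_l)
--     return filtered_coords
-- ===== SOURCE B (Python) =====
-- def split_lane(l):
--     keep = [i for i in range(len(l)) if l[i][0] != -1]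
--     return [[l[i][0] for i in keep], [l[i][1] for i in keep]]
--
-- def lane_coords_preprocess(lane_coords):
--     return [split_lane(l) for l in lane_coords]
-- ===== Notes on version B (the rewrite author's own statement) =====
-- stated objective: alternative
-- what changed: B is index-based: per lane it first builds the list of surviving positions (indices i with l[i][0] != -1) and then extracts each coordinate list by indexed lookup over that index list, instead of A's single value-level pass appending to tmp_x and tmp_y.
import Mathlib
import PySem

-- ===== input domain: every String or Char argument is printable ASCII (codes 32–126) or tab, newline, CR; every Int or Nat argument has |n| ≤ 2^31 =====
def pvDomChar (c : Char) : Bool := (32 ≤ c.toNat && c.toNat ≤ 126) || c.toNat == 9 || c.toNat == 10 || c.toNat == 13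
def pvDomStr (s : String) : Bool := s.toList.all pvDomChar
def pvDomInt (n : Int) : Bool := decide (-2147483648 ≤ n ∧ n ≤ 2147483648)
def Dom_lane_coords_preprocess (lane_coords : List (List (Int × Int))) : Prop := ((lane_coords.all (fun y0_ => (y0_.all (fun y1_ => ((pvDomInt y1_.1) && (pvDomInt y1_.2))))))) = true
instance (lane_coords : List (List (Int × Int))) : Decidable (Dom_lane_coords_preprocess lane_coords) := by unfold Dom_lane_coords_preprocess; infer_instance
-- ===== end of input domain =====

-- B is index-based: per lane it first computes the surviving index list, then extracts each
-- coordinate list by indexed lookup over those indices (alternative decomposition, same cost).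


-- ===== PORT A =====
-- literal port of A: one pass per lane appending to tmp_x / tmp_y inside the filtering loop
def lane_coords_preprocess (lane_coords : List (List (Int × Int))) : List (List (List Int)) :=
  lane_coords.foldl (fun filtered_coords l =>
    let st := l.foldl (fun (st : List Int × List Int) xy =>
      if xy.1 ≠ -1 then (st.1 ++ [xy.1], st.2 ++ [xy.2]) else st) ([], [])
    filtered_coords ++ [[st.1, st.2]]) []

-- ===== PORT B =====
-- port of Source B's split_lane: build the surviving index list, then extract by indexed lookup
-- (l[i] with i drawn from range(len(l)) is always in range, so pyGetD's default is never used)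
def split_lane (l : List (Int × Int)) : List (List Int) :=
  let keep := (PySem.List.pyRange 0 (l.length : Int) 1).filter
      (fun i => (PySem.List.pyGetD l i (0, 0)).1 ≠ -1)
  [keep.map (fun i => (PySem.List.pyGetD l i (0, 0)).1),
   keep.map (fun i => (PySem.List.pyGetD l i (0, 0)).2)]

def lane_coords_preprocess_alt (lane_coords : List (List (Int × Int))) : List (List (List Int)) :=
  lane_coords.map split_lane

-- ===== PRECONDITION & SPEC =====
def Spec_lane_coords_preprocess (lane_coords : List (List (Int × Int))) (out : List (List (List Int))) : Prop := out = lane_coords_preprocess_alt lane_coords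
instance (lane_coords : List (List (Int × Int))) (out : List (List (List Int))) : Decidable (Spec_lane_coords_preprocess lane_coords out) := by unfold Spec_lane_coords_preprocess; infer_instance

-- ===== CLAIM (what is proved, stated in full; the proofs are below) =====
def Claim_equal_lane_coords_preprocess : Prop := ∀ (lane_coords : List (List (Int × Int))), Dom_lane_coords_preprocess lane_coords → Spec_lane_coords_preprocess lane_coords (lane_coords_preprocess lane_coords)

-- ===== LEMMAS AND PROOFS =====

-- extracting a projection through the surviving-index list equals projecting the filtered pairs
lemma pv_sel (l : List (Int × Int)) (f : Int × Int → Int) :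
    ((List.range l.length).filter (fun k => (l.getD k (0, 0)).1 ≠ -1)).map
        (fun k => f (l.getD k (0, 0)))
    = (l.filter (fun p => p.1 ≠ -1)).map f := by
  induction l with
  | nil => simp
  | cons a tl ih =>
    simp only [List.length_cons, List.range_succ_eq_map, List.filter_cons,
      List.filter_map, Function.comp_def, List.getD, List.getElem?_cons_succ]
    by_cases h : a.1 = -1
    · simpa [h, List.getD] using ih
    · simpa [h, List.getD] using ih

-- B's index-based lane splitter equals the filter-then-project view of a lane
lemma pv_lane (l : List (Int × Int)) :
    split_lane l = [(l.filter (fun p => p.1 ≠ -1)).map Prod.fst,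
                    (l.filter (fun p => p.1 ≠ -1)).map Prod.snd] := by
  unfold split_lane
  simp only [PySem.List.pyRange_one, sub_zero, Int.toNat_natCast, zero_add,
    List.filter_map, List.map_map, Function.comp_def, PySem.List.pyGetD_natCast]
  rw [pv_sel l Prod.fst, pv_sel l Prod.snd]

-- the inner append-loop of A computes the filter's two projections
lemma pv_inner (l : List (Int × Int)) (tx ty : List Int) :
    l.foldl (fun (st : List Int × List Int) xy =>
      if xy.1 ≠ -1 then (st.1 ++ [xy.1], st.2 ++ [xy.2]) else st) (tx, ty)
    = (tx ++ (l.filter (fun xy => xy.1 ≠ -1)).map Prod.fst,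
       ty ++ (l.filter (fun xy => xy.1 ≠ -1)).map Prod.snd) := by
  induction l generalizing tx ty with
  | nil => simp
  | cons hd tl ih =>
    rw [List.foldl_cons, List.filter_cons]
    by_cases h : hd.1 = -1
    · rw [if_neg (by simp [h] : ¬(hd.1 ≠ -1)), ih]; simp [h]
    · rw [if_pos (by simp [h] : hd.1 ≠ -1), ih]; simp [h]

lemma pv_main (lane_coords : List (List (Int × Int))) :
    lane_coords_preprocess lane_coords = lane_coords_preprocess_alt lane_coords := by
  unfold lane_coords_preprocess lane_coords_preprocess_alt
  rw [PySem.List.foldl_append_singleton_eq_map]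
  refine List.map_congr_left (fun l _ => ?_)
  rw [pv_lane, pv_inner]
  simp

-- ===== VERDICT (by name: the statement is the Claim_ definition above) =====
theorem lane_coords_preprocess_spec : Claim_equal_lane_coords_preprocess := by
  intro lc _; unfold Spec_lane_coords_preprocess; exact pv_main lc
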